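-- pv_equiv track=rewrite | github.com/GraceAHall/galaxy2janis | src/command/regex/utils.py | strip_common_attributes
-- ===== SOURCE A (Python) =====
-- def strip_common_attributes(match: str, match_end: int, the_string: str) -> str:
--     gx_attributes = set([
--         '.forward',
--         '.reverse',
--         '.ext',
--         '.value',
--         '.name',
--         '.files_path',
--         '.element_identifier'
--     ])
--     # needs to be recursive so we can iterately peel back
--     # eg  in1.forward.ext
--     # need to peel .ext then peel .forward.
--     if match_end < len(the_string):
--         for att in gx_attributes:
--             if match.endswith(att):
--                 # strip from the right - num of chars in the att
--                 match = match[:-len(att)]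
--                 # recurse
--                 match = strip_common_attributes(match, match_end, the_string)
--     return match
-- ===== SOURCE B (Python) =====
-- def strip_common_attributes(match: str, match_end: int, the_string: str) -> str:
--     # Iterative fixpoint: repeatedly strip the first matching attribute suffix
--     # until none matches (no recursion, no rescans of the remaining attributes).
--     atts = ('.forward', '.reverse', '.ext', '.value', '.name',
--             '.files_path', '.element_identifier')
--     if match_end < len(the_string):
--         while True:
--             att = next((a for a in atts if match.endswith(a)), None)
--             if att is None:
--                 break
--             match = match[:-len(att)]
--     return match
-- ===== Notes on version B (the rewrite author's own statement) =====
-- stated objective: simpler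
-- what changed: Replaces A's recursion nested inside a for-loop over the attribute set with a flat iterative loop that finds the first matching attribute suffix, strips it, and repeats until no attribute matches.
import Mathlib
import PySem

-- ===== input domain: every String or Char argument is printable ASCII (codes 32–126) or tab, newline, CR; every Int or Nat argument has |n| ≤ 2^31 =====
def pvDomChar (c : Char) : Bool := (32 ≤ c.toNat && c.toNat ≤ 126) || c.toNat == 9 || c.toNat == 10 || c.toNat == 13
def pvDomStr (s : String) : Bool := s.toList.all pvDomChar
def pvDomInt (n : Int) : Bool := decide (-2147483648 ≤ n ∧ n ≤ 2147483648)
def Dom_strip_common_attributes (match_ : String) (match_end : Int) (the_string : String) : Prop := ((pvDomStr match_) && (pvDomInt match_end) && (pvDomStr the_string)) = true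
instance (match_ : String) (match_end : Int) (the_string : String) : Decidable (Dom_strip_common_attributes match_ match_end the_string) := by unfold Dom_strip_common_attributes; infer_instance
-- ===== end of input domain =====

-- B replaces A's recursion-inside-a-for-loop by a flat iterative strip-until-fixpoint loop (same attribute set, same result).


-- ===== PORT A =====
-- the fixed attribute set (iteration order of Python's set is immaterial: no attribute is a suffix of another)
def pvAtts : List (List Char) :=
  [".forward".toList, ".reverse".toList, ".ext".toList, ".value".toList,
   ".name".toList, ".files_path".toList, ".element_identifier".toList]

-- needed by the ports' termination proofs, so it stays above the claim block
theorem pvSliceLt {att m : List Char} (h1 : att ≠ []) (h2 : PySem.Chars.endswith m att = true) :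
    (PySem.List.slice m none (some (-(att.length : Int)))).length < m.length := by
  have hs : att <:+ m := (PySem.Chars.endswith_iff m att).mp h2
  have hle : att.length ≤ m.length := hs.length_le
  have hk : 0 < att.length := List.length_pos_iff.mpr h1
  rw [PySem.List.slice_to_neg_natCast m att.length hk]
  simp [List.length_take]
  omega

theorem pvAtts_ne_nil : ∀ a ∈ pvAtts, a ≠ [] := by decide

-- A's for-loop with the recursive call inside it, transliterated; the subtype records
-- "the result is no longer than the input", which the Python recursion needs to terminate.
-- The `att ≠ []` conjunct is a pure totality guard: every element of pvAtts is nonempty.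
def pvLoopA : (atts : List (List Char)) → (m : List Char) → {r : List Char // r.length ≤ m.length}
  | [], m => ⟨m, le_refl _⟩
  | att :: rest, m =>
    if h : att ≠ [] ∧ PySem.Chars.endswith m att = true then
      -- match = match[:-len(att)]; match = strip_common_attributes(match, …) ; continue the for-loop
      let r1 := pvLoopA pvAtts (PySem.List.slice m none (some (-(att.length : Int))))
      let r2 := pvLoopA rest r1.val
      ⟨r2.val, le_trans r2.property (le_trans r1.property (le_of_lt (pvSliceLt h.1 h.2)))⟩
    else
      pvLoopA rest m
termination_by atts m => (m.length, atts.length)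
decreasing_by
  · exact Prod.Lex.left _ _ (pvSliceLt h.1 h.2)
  · exact Prod.Lex.left _ _ (lt_of_le_of_lt r1.property (pvSliceLt h.1 h.2))
  · exact Prod.Lex.right _ (by simp)

def strip_common_attributes (match_ : String) (match_end : Int) (the_string : String) : String :=
  if match_end < (PySem.Str.len the_string : Int) then
    String.ofList (pvLoopA pvAtts match_.toList).val
  else
    match_

-- ===== PORT B =====
-- B's while loop: find the first attribute that is a suffix, strip it, repeat; stop when none matches.
def pvLoopB (m : List Char) : List Char :=
  match hf : pvAtts.find? (fun att => PySem.Chars.endswith m att) with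
  | none => m
  | some att => pvLoopB (PySem.List.slice m none (some (-(att.length : Int))))
termination_by m.length
decreasing_by
  exact pvSliceLt (pvAtts_ne_nil att (List.mem_of_find?_eq_some hf))
    (by simpa using List.find?_some hf)

def strip_common_attributes_alt (match_ : String) (match_end : Int) (the_string : String) : String :=
  if match_end < (PySem.Str.len the_string : Int) then
    String.ofList (pvLoopB match_.toList)
  else
    match_

-- ===== PRECONDITION & SPEC =====
def Spec_strip_common_attributes (match_ : String) (match_end : Int) (the_string : String) (out : String) : Prop := out = strip_common_attributes_alt match_ match_end the_string
instance (match_ : String) (match_end : Int) (the_string : String) (out : String) : Decidable (Spec_strip_common_attributes match_ match_end the_string out) := by unfold Spec_strip_common_attributes; infer_instance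

-- ===== CLAIM (what is proved, stated in full; the proofs are below) =====
def Claim_equal_strip_common_attributes : Prop := ∀ (match_ : String) (match_end : Int) (the_string : String), Dom_strip_common_attributes match_ match_end the_string → Spec_strip_common_attributes match_ match_end the_string (strip_common_attributes match_ match_end the_string)

-- ===== LEMMAS AND PROOFS =====

-- scanning a list of attributes none of which matches leaves the string unchanged
theorem pvLoopA_nil (m : List Char) : (pvLoopA [] m).val = m := by
  rw [pvLoopA]

theorem pvLoopB_eq_none (m : List Char)
    (hf : pvAtts.find? (fun att => PySem.Chars.endswith m att) = none) : pvLoopB m = m := by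
  rw [pvLoopB]
  split
  · rfl
  · next att h => rw [hf] at h; simp at h

theorem pvLoopB_eq_some (m att : List Char)
    (hf : pvAtts.find? (fun a => PySem.Chars.endswith m a) = some att) :
    pvLoopB m = pvLoopB (PySem.List.slice m none (some (-(att.length : Int)))) := by
  rw [pvLoopB]
  split
  · next h => rw [hf] at h; simp at h
  · next att' h => rw [hf] at h; injection h with h; rw [h]

theorem pvLoopA_pass (atts : List (List Char)) (m : List Char)
    (h : ∀ a ∈ atts, PySem.Chars.endswith m a = false) : (pvLoopA atts m).val = m := by
  induction atts with
  | nil => exact pvLoopA_nil m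
  | cons att rest ih =>
    rw [pvLoopA]
    rw [dif_neg (by simp [h att (by simp)])]
    exact ih (fun a ha => h a (by simp [ha]))

-- A's scan over a sublist of pvAtts equals: find the first match, strip, and continue with B's loop
theorem pvScanA (n : Nat)
    (ih : ∀ m : List Char, m.length < n →
      (pvLoopA pvAtts m).val = pvLoopB m ∧
      pvAtts.find? (fun att => PySem.Chars.endswith (pvLoopB m) att) = none)
    (atts : List (List Char)) (hsub : ∀ a ∈ atts, a ∈ pvAtts)
    (m : List Char) (hm : m.length ≤ n) :
    (pvLoopA atts m).val =
      match atts.find? (fun att => PySem.Chars.endswith m att) with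
      | none => m
      | some att => pvLoopB (PySem.List.slice m none (some (-(att.length : Int)))) := by
  induction atts with
  | nil => simp [pvLoopA_nil, List.find?]
  | cons att rest ihr =>
    have hmem : att ∈ pvAtts := hsub att (by simp)
    have hne : att ≠ [] := pvAtts_ne_nil att hmem
    by_cases hend : PySem.Chars.endswith m att = true
    · rw [pvLoopA]
      rw [dif_pos ⟨hne, hend⟩]
      rw [List.find?_cons]; simp only [hend]
      have hlt : (PySem.List.slice m none (some (-(att.length : Int)))).length < m.length :=
        pvSliceLt hne hend
      obtain ⟨h1, h2⟩ := ih _ (lt_of_lt_of_le hlt hm)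
      rw [h1]
      exact pvLoopA_pass rest _ (fun a ha => by
        have := List.find?_eq_none.mp h2 a (hsub a (by simp [ha]))
        simpa using this)
    · rw [pvLoopA]
      rw [dif_neg (by simp [hend])]
      have he : PySem.Chars.endswith m att = false := by simpa using hend
      rw [List.find?_cons]; simp only [he]
      exact ihr (fun a ha => hsub a (by simp [ha]))

-- main invariant: A's full scan equals B's loop, and B's result has no attribute suffix left
theorem pvMain (n : Nat) : ∀ m : List Char, m.length < n →
    (pvLoopA pvAtts m).val = pvLoopB m ∧
    pvAtts.find? (fun att => PySem.Chars.endswith (pvLoopB m) att) = none := by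
  induction n with
  | zero => intro m h; omega
  | succ n ih =>
    intro m hm
    have hm' : m.length ≤ n := by omega
    have hscan := pvScanA n ih pvAtts (fun a ha => ha) m hm'
    cases hf : pvAtts.find? (fun att => PySem.Chars.endswith m att) with
    | none =>
      rw [hscan, hf, pvLoopB_eq_none m hf]
      exact ⟨rfl, hf⟩
    | some att =>
      have hmem : att ∈ pvAtts := List.mem_of_find?_eq_some hf
      have hend : PySem.Chars.endswith m att = true := by simpa using List.find?_some hf
      have hlt : (PySem.List.slice m none (some (-(att.length : Int)))).length < n :=
        lt_of_lt_of_le (pvSliceLt (pvAtts_ne_nil att hmem) hend) hm'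
      obtain ⟨_, h2⟩ := ih _ hlt
      rw [hscan, hf, pvLoopB_eq_some m att hf]
      exact ⟨rfl, h2⟩

-- ===== VERDICT (by name: the statement is the Claim_ definition above) =====
theorem strip_common_attributes_spec : Claim_equal_strip_common_attributes := by
  intro match_ match_end the_string _
  unfold Spec_strip_common_attributes strip_common_attributes strip_common_attributes_alt
  split_ifs with h
  · rw [(pvMain (match_.toList.length + 1) match_.toList (by omega)).1]
  · rfl
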